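-- pv_equiv track=rewrite | github.com/edwinyyyu/MemMachine | evaluation/attribute_memory/research/round23_prose_facts/architectures/aen6_prose_v2.py | _build_eid_alias
-- ===== SOURCE A (Python) =====
-- def _build_eid_alias(resolution_map: dict[str, set[str]]) -> dict[str, str]:
--     def _alias(idx: int) -> str:
--         s = ""
--         n = idx
--         while True:
--             s = chr(ord("A") + (n % 26)) + s
--             n = n // 26 - 1
--             if n < 0:
--                 break
--         return s
--
--     return {eid: _alias(i) for i, eid in enumerate(sorted(resolution_map.keys()))}
-- ===== SOURCE B (Python) =====
-- def _build_eid_alias(resolution_map: dict[str, set[str]]) -> dict[str, str]: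
--     result = {}
--     label = []  # letters of the current alias, least-significant first
--     for eid in sorted(resolution_map.keys()):
--         # increment the label odometer-style (bijective base 26)
--         i = 0
--         while True:
--             if i == len(label):
--                 label.append("A")
--                 break
--             if label[i] == "Z":
--                 label[i] = "A"
--                 i += 1
--             else:
--                 label[i] = chr(ord(label[i]) + 1)
--                 break
--         result[eid] = "".join(reversed(label))
--     return result
-- ===== Notes on version B (the rewrite author's own statement) =====
-- stated objective: alternative
-- what changed: Instead of recomputing each alias from its index by repeated %26//26 digit extraction, B maintains one running label across the loop and increments it odometer-style (bijective base-26 carry) per sorted key.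
import Mathlib
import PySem

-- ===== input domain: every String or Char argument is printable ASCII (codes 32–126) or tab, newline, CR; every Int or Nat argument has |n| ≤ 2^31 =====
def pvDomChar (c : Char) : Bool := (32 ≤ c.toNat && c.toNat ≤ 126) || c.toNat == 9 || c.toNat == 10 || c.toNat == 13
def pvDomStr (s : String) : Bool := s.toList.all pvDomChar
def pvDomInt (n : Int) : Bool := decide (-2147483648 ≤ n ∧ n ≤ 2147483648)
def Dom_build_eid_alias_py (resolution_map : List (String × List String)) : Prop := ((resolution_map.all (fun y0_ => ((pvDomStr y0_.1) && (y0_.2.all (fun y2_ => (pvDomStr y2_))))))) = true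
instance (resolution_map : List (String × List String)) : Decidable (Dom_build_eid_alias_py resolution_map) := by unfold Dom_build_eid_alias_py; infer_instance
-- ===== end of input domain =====

-- B replaces the per-index %26-digit-extraction helper by one running label incremented
-- odometer-style (bijective base-26 carry) across the sorted keys; same result, alternative algorithm.

-- ===== PORT A =====
-- the while-loop of _alias (s = chr(65 + n%26) + s; n = n//26 - 1; break when n < 0, i.e. when n < 26);
-- the loop variable n comes from enumerate indices, so n ≥ 0 and Nat % and / coincide with Python's
-- operators here (exact on this domain)
def pyAliasLoop (n : Nat) (s : List Char) : List Char :=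
  if n < 26 then Char.ofNat (65 + n % 26) :: s
  else pyAliasLoop (n / 26 - 1) (Char.ofNat (65 + n % 26) :: s)
termination_by n
decreasing_by omega

def pyAlias (idx : Int) : String := String.ofList (pyAliasLoop idx.toNat [])

def build_eid_alias_py (resolution_map : List (String × List String)) : List (String × String) :=
  let keys := PySem.List.sorted (PySem.Set.ofList (resolution_map.map Prod.fst)) (fun x => x) false
  (PySem.List.enumerate keys 0).map (fun p => (p.2, pyAlias p.1))

-- ===== PORT B =====
-- odometer increment of the label, least-significant letter first
def incAlias : List Char → List Char
  | [] => ['A']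
  | c :: rest => if c = 'Z' then 'A' :: incAlias rest else Char.ofNat (c.toNat + 1) :: rest

def build_eid_alias_py_alt (resolution_map : List (String × List String)) : List (String × String) :=
  let keys := PySem.List.sorted (PySem.Set.ofList (resolution_map.map Prod.fst)) (fun x => x) false
  (keys.foldl
    (fun acc eid => (acc.1 ++ [(eid, String.ofList (incAlias acc.2).reverse)], incAlias acc.2))
    (([] : List (String × String)), ([] : List Char))).1

-- ===== PRECONDITION & SPEC =====
def Spec_build_eid_alias_py (resolution_map : List (String × List String)) (out : List (String × String)) : Prop := out = build_eid_alias_py_alt resolution_map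
instance (resolution_map : List (String × List String)) (out : List (String × String)) : Decidable (Spec_build_eid_alias_py resolution_map out) := by unfold Spec_build_eid_alias_py; infer_instance

-- ===== CLAIM (what is proved, stated in full; the proofs are below) =====
def Claim_equal_build_eid_alias_py : Prop := ∀ (resolution_map : List (String × List String)), Dom_build_eid_alias_py resolution_map → Spec_build_eid_alias_py resolution_map (build_eid_alias_py resolution_map)

-- ===== LEMMAS AND PROOFS =====

-- the bijective-base-26 digits of n, least-significant first
def rep (n : Nat) : List Char :=
  Char.ofNat (65 + n % 26) :: (if n < 26 then [] else rep (n / 26 - 1))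
termination_by n
decreasing_by omega

theorem rep_zero : rep 0 = ['A'] := by rw [rep]; rfl

theorem pyAliasLoop_eq_rep (n : Nat) : ∀ s : List Char, pyAliasLoop n s = (rep n).reverse ++ s := by
  induction n using Nat.strong_induction_on with
  | _ n ih =>
    intro s
    rw [pyAliasLoop, rep]
    by_cases h : n < 26
    · simp [h]
    · simp only [if_neg h]
      rw [ih (n / 26 - 1) (by omega)]
      simp

theorem incAlias_rep (n : Nat) : incAlias (rep n) = rep (n + 1) := by
  induction n using Nat.strong_induction_on with
  | _ n ih =>
    rw [rep, incAlias]
    by_cases h : n % 26 = 25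
    · have hz : Char.ofNat (65 + n % 26) = 'Z' := by rw [h]
      rw [if_pos hz]
      conv_rhs => rw [rep]
      have h1 : (n + 1) % 26 = 0 := by omega
      have h2 : ¬ n + 1 < 26 := by omega
      rw [h1, if_neg h2]
      have hhead : ('A' : Char) = Char.ofNat (65 + 0) := rfl
      by_cases hlt : n < 26
      · -- n = 25 : the carry falls off the front
        have hn : n = 25 := by omega
        subst hn
        rw [if_pos hlt]
        show 'A' :: incAlias [] = _
        rw [show incAlias [] = ['A'] from rfl]
        norm_num
        rw [rep_zero]
      · rw [if_neg hlt, ih (n / 26 - 1) (by omega)]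
        have h3 : n / 26 - 1 + 1 = (n + 1) / 26 - 1 := by omega
        rw [h3, hhead]
    · have hnz : Char.ofNat (65 + n % 26) ≠ 'Z' := by
        have hk : n % 26 < 25 := by omega
        interval_cases h' : (n % 26) <;> decide
      rw [if_neg hnz]
      conv_rhs => rw [rep]
      have h1 : (n + 1) % 26 = n % 26 + 1 := by omega
      have hhead : Char.ofNat ((Char.ofNat (65 + n % 26)).toNat + 1) = Char.ofNat (65 + (n + 1) % 26) := by
        rw [h1]
        have hk : n % 26 < 25 := by omega
        interval_cases h' : (n % 26) <;> decide
      rw [hhead]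
      by_cases hlt : n < 26
      · have hlt' : n + 1 < 26 := by omega
        rw [if_pos hlt, if_pos hlt']
      · have hlt' : ¬ n + 1 < 26 := by omega
        have h3 : n / 26 - 1 = (n + 1) / 26 - 1 := by omega
        rw [if_neg hlt, if_neg hlt', h3]

theorem foldB (keys : List String) (acc : List (String × String)) (n : Nat) :
    (keys.foldl
      (fun acc eid => (acc.1 ++ [(eid, String.ofList (incAlias acc.2).reverse)], incAlias acc.2))
      (acc, rep n)).1
    = acc ++ (PySem.List.enumerate keys ((n : Int) + 1)).map
        (fun p => (p.2, String.ofList (rep p.1.toNat).reverse)) := by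
  induction keys generalizing acc n with
  | nil => simp [PySem.List.enumerate]
  | cons x rest ih =>
      rw [List.foldl_cons]
      simp only [incAlias_rep]
      rw [ih (acc ++ [(x, String.ofList (rep (n + 1)).reverse)]) (n + 1)]
      rw [PySem.List.enumerate_cons]
      have h1 : ((n : Int) + 1).toNat = n + 1 := by omega
      have h2 : ((n : Int) + 1 + 1) = ((n + 1 : Nat) : Int) + 1 := by push_cast; ring
      simp [h1, h2]

theorem main_eq (keys : List String) :
    (PySem.List.enumerate keys 0).map (fun p => (p.2, pyAlias p.1))
    = (keys.foldl
        (fun acc eid => (acc.1 ++ [(eid, String.ofList (incAlias acc.2).reverse)], incAlias acc.2))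
        (([] : List (String × String)), ([] : List Char))).1 := by
  cases keys with
  | nil => simp [PySem.List.enumerate]
  | cons x rest =>
      rw [List.foldl_cons]
      have h0 : incAlias ([] : List Char) = rep 0 := by rw [rep_zero]; rfl
      simp only [h0, List.nil_append]
      rw [foldB rest [(x, String.ofList (rep 0).reverse)] 0]
      rw [PySem.List.enumerate_cons]
      simp only [List.map_cons, List.singleton_append]
      congr 1
      · simp [pyAlias, pyAliasLoop_eq_rep, rep_zero]
      · apply List.map_congr_left
        intro p hp
        simp [pyAlias, pyAliasLoop_eq_rep]

-- ===== VERDICT (by name: the statement is the Claim_ definition above) =====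
theorem build_eid_alias_py_spec : Claim_equal_build_eid_alias_py := by
  intro rm _
  unfold Spec_build_eid_alias_py build_eid_alias_py build_eid_alias_py_alt
  exact main_eq _
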